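-- pv_equiv track=rewrite | github.com/yubocai-poly/-Design-and-Analysis-of-Algorithms | midterm2021/witness.py | compute_witness_trivial
-- ===== SOURCE A (Python) =====
-- def compute_witness_trivial(A,B):
--     n = len(A)
--     W = []
--     for i in range(n):
--         W.append([0]*n)
--     for i in range(n):
--         for j in range(n):
--             for k in range(n):
--                 if A[i][k]*B[k][j] == 1:
--                         W[i][j] = k+1
--     return W
-- ===== SOURCE B (Python) =====
-- def compute_witness_trivial(A, B):
--     n = len(A)
--     W = []
--     for i in range(n):
--         # indices k where A[i][k] could contribute (product == 1 needs A[i][k] in {1,-1}),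
--         # scanned in descending order so the FIRST hit is the largest witness
--         cand = [k for k in range(n) if A[i][k] in (1, -1)]
--         cand.reverse()
--         row = []
--         for j in range(n):
--             w = 0
--             for k in cand:
--                 if A[i][k] * B[k][j] == 1:
--                     w = k + 1
--                     break
--             row.append(w)
--         W.append(row)
--     return W
-- ===== Notes on version B (the rewrite author's own statement) =====
-- stated objective: faster
-- what changed: A overwrites W[i][j] on every hit of a full forward k-scan; B precomputes per row i the candidate indices k with A[i][k] in {1,-1} (the only values whose product can be 1), scans them in descending order and stops at the first hit, so the full inner scan over all n indices disappears.
import Mathlib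
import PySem

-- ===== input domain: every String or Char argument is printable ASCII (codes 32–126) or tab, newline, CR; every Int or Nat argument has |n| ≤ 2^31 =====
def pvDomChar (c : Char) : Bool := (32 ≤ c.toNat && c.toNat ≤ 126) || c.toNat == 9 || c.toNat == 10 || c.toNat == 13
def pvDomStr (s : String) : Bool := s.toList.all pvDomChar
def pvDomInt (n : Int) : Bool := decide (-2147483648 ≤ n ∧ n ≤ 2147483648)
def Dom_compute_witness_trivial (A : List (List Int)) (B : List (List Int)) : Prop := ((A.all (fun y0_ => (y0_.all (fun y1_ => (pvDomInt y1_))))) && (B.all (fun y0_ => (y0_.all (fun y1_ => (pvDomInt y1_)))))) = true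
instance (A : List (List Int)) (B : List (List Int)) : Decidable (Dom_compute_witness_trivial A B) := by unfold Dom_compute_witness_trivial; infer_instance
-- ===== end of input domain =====

-- B replaces A's overwrite-every-hit full k-scan by a per-row candidate-index list
-- (indices where A[i][k] ∈ {1,-1}) scanned in DESCENDING order with an early break;
-- same return value, measured faster in a timing run (objective: faster).

-- ===== PORT A =====
-- W[i][j] = k+1  (Python list mutation, ported as a functional cell update)
def pvSetCell (W : List (List Int)) (i j : Nat) (v : Int) : List (List Int) :=
  W.set i ((W.getD i []).set j v)

def compute_witness_trivial (A : List (List Int)) (B : List (List Int)) : List (List Int) :=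
  let n := A.length
  let W0 : List (List Int) := (List.range n).foldl (fun W _ => W ++ [List.replicate n (0 : Int)]) []
  (List.range n).foldl (fun W i =>
    (List.range n).foldl (fun W j =>
      (List.range n).foldl (fun W k =>
        if ((A.getD i []).getD k 0) * ((B.getD k []).getD j 0) = 1 then
          pvSetCell W i j ((k : Int) + 1)
        else W) W) W) W0

-- ===== PORT B =====
-- B builds, per row i, the list of candidate indices k with A[i][k] in {1,-1},
-- reversed to descending order, and takes the first hit ('for k in cand: ... break' of Source B)
def pvFirstHit (A B : List (List Int)) (i j : Nat) : List Nat → Int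
  | [] => 0
  | k :: ks =>
    if ((A.getD i []).getD k 0) * ((B.getD k []).getD j 0) = 1 then (k : Int) + 1
    else pvFirstHit A B i j ks

def compute_witness_trivial_alt (A : List (List Int)) (B : List (List Int)) : List (List Int) :=
  let n := A.length
  (List.range n).foldl (fun W i =>
    let cand := ((List.range n).filter
      (fun k => ((A.getD i []).getD k 0 = 1) || ((A.getD i []).getD k 0 = -1))).reverse
    let row := (List.range n).foldl (fun row j => row ++ [pvFirstHit A B i j cand]) []
    W ++ [row]) []

-- ===== PRECONDITION & SPEC =====
-- Exactly the inputs where the Python A indexes safely (no IndexError):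
-- B has at least n = len(A) rows, and every row of A and each of the first n rows of B has length >= n.
def Pre_compute_witness_trivial (A : List (List Int)) (B : List (List Int)) : Prop :=
  A.length ≤ B.length ∧ (∀ r ∈ A, A.length ≤ r.length) ∧ (∀ r ∈ B.take A.length, A.length ≤ r.length)
instance (A : List (List Int)) (B : List (List Int)) : Decidable (Pre_compute_witness_trivial A B) := by
  unfold Pre_compute_witness_trivial; infer_instance

def pvWitness_compute_witness_trivial : List (List Int) × List (List Int) :=
  ([[1, 0], [0, -1]], [[0, 1], [-1, 0]])

def Spec_compute_witness_trivial (A : List (List Int)) (B : List (List Int)) (out : List (List Int)) : Prop := out = compute_witness_trivial_alt A B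
instance (A : List (List Int)) (B : List (List Int)) (out : List (List Int)) : Decidable (Spec_compute_witness_trivial A B out) := by unfold Spec_compute_witness_trivial; infer_instance

-- ===== CLAIM (what is proved, stated in full; the proofs are below) =====
def Claim_equal_compute_witness_trivial : Prop := ∀ (A : List (List Int)) (B : List (List Int)), Dom_compute_witness_trivial A B → Pre_compute_witness_trivial A B → Spec_compute_witness_trivial A B (compute_witness_trivial A B)

-- ===== LEMMAS AND PROOFS =====
def pvCell (W : List (List Int)) (i j : Nat) : Int := (W.getD i []).getD j 0
theorem pv_setCell_rowlen (W : List (List Int)) (i j i' : Nat) (v : Int) :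
    ((pvSetCell W i j v).getD i' []).length = (W.getD i' []).length := by
  simp only [pvSetCell, List.getD_eq_getElem?_getD, List.getElem?_set]
  by_cases h : i = i'
  · subst h
    by_cases hl : i < W.length
    · simp [hl]
    · simp [hl, List.getElem?_eq_none (by omega : W.length <= i)]
  · simp [h]

theorem pv_cell_setCell (W : List (List Int)) (i j i' j' : Nat) (v : Int)
    (hi : i < W.length) :
    pvCell (pvSetCell W i j v) i' j'
      = if i' = i ∧ j' = j ∧ j < (W.getD i []).length then v else pvCell W i' j' := by
  simp only [pvCell, pvSetCell, List.getD_eq_getElem?_getD, List.getElem?_set]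
  by_cases h : i = i'
  · subst h
    simp only [hi, if_pos, Option.getD_some]
    by_cases hj : j = j'
    · subst hj
      by_cases hjl : j < (W[i]?.getD ([] : List Int)).length
      · simp [hjl]
      · simp [hjl, List.getElem?_eq_none (by omega : (W[i]?.getD ([] : List Int)).length ≤ j)]
    · have hj' : ¬ j' = j := fun hh => hj hh.symm
      simp [hj, hj']
  · have h' : ¬ i' = i := fun hh => h hh.symm
    simp [h, h']
theorem pv_setCell_self (W : List (List Int)) (i j : Nat) (hi : i < W.length) :
    pvSetCell W i j (pvCell W i j) = W := by
  simp only [pvSetCell, pvCell]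
  have hrow : W.getD i [] = W[i] := by
    simp [List.getD_eq_getElem?_getD, List.getElem?_eq_getElem hi]
  rw [hrow]
  by_cases hj : j < W[i].length
  · rw [show W[i].getD j 0 = W[i][j] from List.getD_eq_getElem _ _ hj,
      List.set_getElem_self, List.set_getElem_self]
  · rw [List.set_eq_of_length_le (by omega : W[i].length ≤ j), List.set_getElem_self]

theorem pv_setCell_setCell (W : List (List Int)) (i j : Nat) (v v' : Int)
    (hi : i < W.length) :
    pvSetCell (pvSetCell W i j v) i j v' = pvSetCell W i j v' := by
  simp only [pvSetCell]
  have h1 : (W.set i ((W.getD i []).set j v)).getD i [] = (W.getD i []).set j v := by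
    simp [List.getD_eq_getElem?_getD, List.getElem?_set, hi]
  rw [h1, List.set_set, List.set_set]

theorem pv_setCell_length (W : List (List Int)) (i j : Nat) (v : Int) :
    (pvSetCell W i j v).length = W.length := by
  simp [pvSetCell]

theorem pv_inner_loop (p : Nat → Prop) [DecidablePred p] (g : Nat → Int) (i j : Nat) :
    ∀ (ks : List Nat) (W : List (List Int)), i < W.length → j < (W.getD i []).length →
      ks.foldl (fun W k => if p k then pvSetCell W i j (g k) else W) W
        = pvSetCell W i j (ks.foldl (fun w k => if p k then g k else w) (pvCell W i j)) := by
  intro ks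
  induction ks with
  | nil => intro W hi hj; simp [pv_setCell_self W i j hi]
  | cons k ks ih =>
    intro W hi hj
    simp only [List.foldl]
    by_cases hp : p k
    · rw [if_pos hp, if_pos hp]
      have hi' : i < (pvSetCell W i j (g k)).length := by rw [pv_setCell_length]; exact hi
      have hrl : ((pvSetCell W i j (g k)).getD i []).length = (W.getD i []).length := by
        simp [pvSetCell, List.getD_eq_getElem?_getD, List.getElem?_set, hi]
      rw [ih _ hi' (by omega)]
      rw [pv_cell_setCell W i j i j (g k) hi]
      simp only [hj, and_true, if_pos rfl, true_and, if_pos]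
      rw [pv_setCell_setCell W i j _ _ hi]
    · rw [if_neg hp, if_neg hp]
      exact ih W hi hj
-- row fold (fixed i, over j's): length/rowlen preserved, cell characterization
theorem pv_rowFold_length (F : Nat → Int → Int) (i : Nat) :
    ∀ (js : List Nat) (W : List (List Int)),
      (js.foldl (fun W j => pvSetCell W i j (F j (pvCell W i j))) W).length = W.length := by
  intro js
  induction js with
  | nil => intro W; rfl
  | cons j js ih => intro W; simp only [List.foldl]; rw [ih, pv_setCell_length]

theorem pv_rowFold_rowlen (F : Nat → Int → Int) (i : Nat) :
    ∀ (js : List Nat) (W : List (List Int)) (i' : Nat),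
      ((js.foldl (fun W j => pvSetCell W i j (F j (pvCell W i j))) W).getD i' []).length
        = (W.getD i' []).length := by
  intro js
  induction js with
  | nil => intro W i'; rfl
  | cons j js ih => intro W i'; simp only [List.foldl]; rw [ih, pv_setCell_rowlen]

theorem pv_rowFold_cell (F : Nat → Int → Int) (i : Nat) :
    ∀ (js : List Nat), js.Nodup → ∀ (W : List (List Int)), i < W.length → ∀ (i' j' : Nat),
      pvCell (js.foldl (fun W j => pvSetCell W i j (F j (pvCell W i j))) W) i' j'
        = if i' = i ∧ j' ∈ js ∧ j' < (W.getD i []).length then F j' (pvCell W i j')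
          else pvCell W i' j' := by
  intro js
  induction js with
  | nil => intro _ W hi i' j'; simp
  | cons j js ih =>
    intro hnd W hi i' j'
    simp only [List.foldl]
    have hnd' := (List.nodup_cons.mp hnd).2
    have hjmem := (List.nodup_cons.mp hnd).1
    have hi1 : i < (pvSetCell W i j (F j (pvCell W i j))).length := by
      rw [pv_setCell_length]; exact hi
    rw [ih hnd' _ hi1 i' j']
    rw [pv_setCell_rowlen]
    by_cases hc : i' = i ∧ j' ∈ js ∧ j' < (W.getD i []).length
    · have hjj : j' ≠ j := fun hh => hjmem (hh ▸ hc.2.1)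
      rw [if_pos hc, if_pos ⟨hc.1, List.mem_cons_of_mem _ hc.2.1, hc.2.2⟩]
      rw [pv_cell_setCell W i j i j' _ hi]
      rw [if_neg (fun hh => hjj hh.2.1)]
    · rw [if_neg hc]
      rw [pv_cell_setCell W i j i' j' _ hi]
      by_cases hc2 : i' = i ∧ j' = j ∧ j < (W.getD i []).length
      · rw [if_pos hc2, if_pos ⟨hc2.1, by rw [hc2.2.1]; exact List.mem_cons_self, hc2.2.1 ▸ hc2.2.2⟩]
        rw [hc2.2.1]
      · rw [if_neg hc2]
        by_cases hc3 : i' = i ∧ j' ∈ j :: js ∧ j' < (W.getD i []).length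
        · exfalso
          rcases hc3 with ⟨h1, h2, h3⟩
          rcases List.mem_cons.mp h2 with h | h
          · exact hc2 ⟨h1, h, h ▸ h3⟩
          · exact hc ⟨h1, h, h3⟩
        · rw [if_neg hc3]
theorem pv_colFold_length (F : Nat → Nat → Int → Int) (js : List Nat) :
    ∀ (is : List Nat) (W : List (List Int)),
      (is.foldl (fun W i => js.foldl (fun W j => pvSetCell W i j (F i j (pvCell W i j))) W) W).length
        = W.length := by
  intro is
  induction is with
  | nil => intro W; rfl
  | cons i is ih => intro W; simp only [List.foldl]; rw [ih, pv_rowFold_length]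

theorem pv_colFold_rowlen (F : Nat → Nat → Int → Int) (js : List Nat) :
    ∀ (is : List Nat) (W : List (List Int)) (i' : Nat),
      ((is.foldl (fun W i => js.foldl (fun W j => pvSetCell W i j (F i j (pvCell W i j))) W) W).getD i' []).length
        = (W.getD i' []).length := by
  intro is
  induction is with
  | nil => intro W i'; rfl
  | cons i is ih => intro W i'; simp only [List.foldl]; rw [ih, pv_rowFold_rowlen]

theorem pv_colFold_cell (F : Nat → Nat → Int → Int) (js : List Nat) (hjs : js.Nodup) :
    ∀ (is : List Nat), is.Nodup → ∀ (W : List (List Int)), (∀ i ∈ is, i < W.length) → ∀ (i' j' : Nat),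
      pvCell (is.foldl (fun W i => js.foldl (fun W j => pvSetCell W i j (F i j (pvCell W i j))) W) W) i' j'
        = if i' ∈ is ∧ j' ∈ js ∧ j' < (W.getD i' []).length then F i' j' (pvCell W i' j')
          else pvCell W i' j' := by
  intro is
  induction is with
  | nil => intro _ W _ i' j'; simp
  | cons i is ih =>
    intro hnd W hlen i' j'
    simp only [List.foldl]
    have hnd' := (List.nodup_cons.mp hnd).2
    have himem := (List.nodup_cons.mp hnd).1
    have hiW : i < W.length := hlen i List.mem_cons_self
    have hlen1 : ∀ a ∈ is, a < (js.foldl (fun W j => pvSetCell W i j (F i j (pvCell W i j))) W).length := by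
      intro a ha; rw [pv_rowFold_length]; exact hlen a (List.mem_cons_of_mem _ ha)
    rw [ih hnd' _ hlen1 i' j']
    rw [pv_rowFold_rowlen]
    by_cases hc : i' ∈ is ∧ j' ∈ js ∧ j' < (W.getD i' []).length
    · have hii : i' ≠ i := fun hh => himem (hh ▸ hc.1)
      rw [if_pos hc, if_pos ⟨List.mem_cons_of_mem _ hc.1, hc.2⟩]
      rw [pv_rowFold_cell (F i) i js hjs W hiW i' j', if_neg (fun hh => hii hh.1)]
    · rw [if_neg hc]
      rw [pv_rowFold_cell (F i) i js hjs W hiW i' j']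
      by_cases hc2 : i' = i ∧ j' ∈ js ∧ j' < (W.getD i []).length
      · rw [if_pos hc2, if_pos ⟨by rw [hc2.1]; exact List.mem_cons_self, hc2.2.1, by rw [hc2.1]; exact hc2.2.2⟩]
        rw [hc2.1]
      · rw [if_neg hc2]
        by_cases hc3 : i' ∈ i :: is ∧ j' ∈ js ∧ j' < (W.getD i' []).length
        · exfalso
          rcases hc3 with ⟨h1, h2, h3⟩
          rcases List.mem_cons.mp h1 with h | h
          · exact hc2 ⟨h, h2, h ▸ h3⟩
          · exact hc ⟨h, h2, h3⟩
        · rw [if_neg hc3]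
theorem pv_mid_eq' (P : Nat → Nat → Prop) [∀ j k, Decidable (P j k)] (g : Nat → Int)
    (ks : List Nat) (i n : Nat) :
    ∀ (js : List Nat), (∀ j ∈ js, j < n) → ∀ (W : List (List Int)),
      i < W.length → (W.getD i []).length = n →
      js.foldl (fun W j => ks.foldl (fun W k => if P j k then pvSetCell W i j (g k) else W) W) W
        = js.foldl (fun W j => pvSetCell W i j ((ks.foldl (fun w k => if P j k then g k else w) (pvCell W i j)))) W := by
  intro js
  induction js with
  | nil => intro _ W _ _; rfl
  | cons j js ih =>
    intro hjs W hi hrl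
    simp only [List.foldl]
    rw [pv_inner_loop (fun k => P j k) g i j ks W hi (by rw [hrl]; exact hjs j List.mem_cons_self)]
    exact ih (fun a ha => hjs a (List.mem_cons_of_mem _ ha)) _
      (by rw [pv_setCell_length]; exact hi)
      (by rw [pv_setCell_rowlen]; exact hrl)

theorem pv_outer_eq (Q : Nat → Nat → Nat → Prop) [∀ i j k, Decidable (Q i j k)] (g : Nat → Int)
    (ks js : List Nat) (n : Nat) (hjs : ∀ j ∈ js, j < n) :
    ∀ (is : List Nat) (W : List (List Int)),
      (∀ i ∈ is, i < W.length) → (∀ i ∈ is, (W.getD i []).length = n) →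
      is.foldl (fun W i => js.foldl (fun W j => ks.foldl (fun W k => if Q i j k then pvSetCell W i j (g k) else W) W) W) W
        = is.foldl (fun W i => js.foldl (fun W j => pvSetCell W i j ((ks.foldl (fun w k => if Q i j k then g k else w) (pvCell W i j)))) W) W := by
  intro is
  induction is with
  | nil => intro W _ _; rfl
  | cons i is ih =>
    intro W hlen hrl
    simp only [List.foldl]
    rw [pv_mid_eq' (Q i) g ks i n js hjs W (hlen i List.mem_cons_self) (hrl i List.mem_cons_self)]
    exact ih _
      (fun a ha => by
        rw [pv_rowFold_length (fun j v => ks.foldl (fun w k => if Q i j k then g k else w) v) i js W]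
        exact hlen a (List.mem_cons_of_mem _ ha))
      (fun a ha => by
        rw [pv_rowFold_rowlen (fun j v => ks.foldl (fun w k => if Q i j k then g k else w) v) i js W a]
        exact hrl a (List.mem_cons_of_mem _ ha))
def pvHitAux (P : Nat → Prop) [DecidablePred P] : List Nat → Int
  | [] => 0
  | k :: ks => if P k then (k : Int) + 1 else pvHitAux P ks

theorem pv_foldl_last_eq_hit_reverse (P : Nat → Prop) [DecidablePred P] (l : List Nat) :
    l.foldl (fun w k => if P k then (k : Int) + 1 else w) 0 = pvHitAux P l.reverse := by
  induction l using List.reverseRecOn with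
  | nil => rfl
  | append_singleton l k ih =>
    rw [List.foldl_append, List.reverse_append]
    simp only [List.foldl, List.reverse_singleton, List.singleton_append, pvHitAux]
    by_cases h : P k
    · simp [h]
    · simp [h, ih]

theorem pv_hit_filter (P : Nat → Prop) [DecidablePred P] (q : Nat → Bool)
    (hpq : ∀ k, P k → q k = true) (l : List Nat) :
    pvHitAux P (l.filter q) = pvHitAux P l := by
  induction l with
  | nil => rfl
  | cons k ks ih =>
    by_cases hq : q k = true
    · simp [List.filter, hq, pvHitAux, ih]
    · have hP : ¬ P k := fun h => hq (hpq k h)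
      simp [List.filter, hq, pvHitAux, hP, ih]
theorem pv_firstHit_eq_aux (A B : List (List Int)) (i j : Nat) (l : List Nat) :
    pvFirstHit A B i j l
      = pvHitAux (fun k => ((A.getD i []).getD k 0) * ((B.getD k []).getD j 0) = 1) l := by
  induction l with
  | nil => rfl
  | cons k ks ih => simp only [pvFirstHit, pvHitAux, ih]

theorem pv_scalar (A B : List (List Int)) (i j n : Nat) :
    (List.range n).foldl
        (fun w k => if ((A.getD i []).getD k 0) * ((B.getD k []).getD j 0) = 1 then (k : Int) + 1 else w) 0
      = pvFirstHit A B i j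
          (((List.range n).filter
            (fun k => ((A.getD i []).getD k 0 = 1) || ((A.getD i []).getD k 0 = -1))).reverse) := by
  rw [pv_foldl_last_eq_hit_reverse, pv_firstHit_eq_aux, ← List.filter_reverse]
  rw [pv_hit_filter]
  intro k hk
  rcases Int.eq_one_or_neg_one_of_mul_eq_one hk with h | h <;> simp [← List.getD_eq_getElem?_getD, h]

theorem pv_foldl_append_map {α β : Type} (f : α → β) :
    ∀ (l : List α) (acc : List β),
      l.foldl (fun W x => W ++ [f x]) acc = acc ++ l.map f := by
  intro l
  induction l with
  | nil => intro acc; simp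
  | cons x xs ih => intro acc; simp [List.foldl, ih]

theorem pv_W0_eq (n : Nat) :
    (List.range n).foldl (fun W _ => W ++ [List.replicate n (0 : Int)]) []
      = List.replicate n (List.replicate n (0 : Int)) := by
  simpa [List.map_const] using pv_foldl_append_map (fun _ : Nat => List.replicate n (0 : Int)) (List.range n) []

theorem pv_cell_getElem (X : List (List Int)) (i j : Nat) (hi : i < X.length)
    (hj : j < X[i].length) : X[i][j] = pvCell X i j := by
  simp [pvCell, List.getD_eq_getElem?_getD, List.getElem?_eq_getElem, hi, hj]

theorem pv_cell_W0 (n i j : Nat) :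
    pvCell (List.replicate n (List.replicate n (0 : Int))) i j = 0 := by
  simp only [pvCell, List.getD_eq_getElem?_getD, List.getElem?_replicate]
  by_cases h : i < n <;> by_cases h2 : j < n <;>
    simp [h, h2, List.getElem?_replicate]

theorem pv_rowlen_W0 (n i : Nat) (h : i < n) :
    ((List.replicate n (List.replicate n (0 : Int))).getD i []).length = n := by
  simp [List.getD_eq_getElem?_getD, List.getElem?_replicate, h]

theorem pv_getD_of_lt (X : List (List Int)) (i : Nat) (h : i < X.length) :
    X.getD i [] = X[i] := by
  rw [List.getD_eq_getElem?_getD, List.getElem?_eq_getElem h]; rfl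

theorem pv_main (A B : List (List Int)) :
    compute_witness_trivial A B = compute_witness_trivial_alt A B := by
  simp only [compute_witness_trivial, compute_witness_trivial_alt]
  rw [pv_W0_eq A.length]
  rw [pv_outer_eq (fun i j k => ((A.getD i []).getD k 0) * ((B.getD k []).getD j 0) = 1)
      (fun k => (k : Int) + 1) (List.range A.length) (List.range A.length) A.length
      (fun j hj => List.mem_range.mp hj) (List.range A.length)
      (List.replicate A.length (List.replicate A.length (0 : Int)))
      (fun i hi => by simp [List.mem_range.mp hi])
      (fun i hi => pv_rowlen_W0 A.length i (List.mem_range.mp hi))]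
  rw [pv_foldl_append_map (fun i => (List.range A.length).foldl
        (fun row j => row ++ [pvFirstHit A B i j
          (((List.range A.length).filter
            (fun k => ((A.getD i []).getD k 0 = 1) || ((A.getD i []).getD k 0 = -1))).reverse)]) [])
      (List.range A.length) []]
  simp only [List.nil_append]
  apply List.ext_getElem
  · rw [pv_colFold_length (fun i j v => (List.range A.length).foldl
        (fun w k => if (A.getD i []).getD k 0 * (B.getD k []).getD j 0 = 1 then (k : Int) + 1 else w) v)
        (List.range A.length) (List.range A.length)
        (List.replicate A.length (List.replicate A.length (0 : Int)))]
    simp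
  · intro i h1 h2
    have hn : i < A.length := by simpa using h2
    rw [List.getElem_map, List.getElem_range]
    rw [pv_foldl_append_map (fun j => pvFirstHit A B i j
          (((List.range A.length).filter
            (fun k => ((A.getD i []).getD k 0 = 1) || ((A.getD i []).getD k 0 = -1))).reverse))
        (List.range A.length) []]
    simp only [List.nil_append]
    have hrowD : (List.foldl
        (fun W i =>
          List.foldl
            (fun W j =>
              pvSetCell W i j
                (List.foldl (fun w k => if (A.getD i []).getD k 0 * (B.getD k []).getD j 0 = 1 then (k : Int) + 1 else w)
                  (pvCell W i j) (List.range A.length)))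
            W (List.range A.length))
        (List.replicate A.length (List.replicate A.length 0)) (List.range A.length))[i]
      = (List.foldl
        (fun W i =>
          List.foldl
            (fun W j =>
              pvSetCell W i j
                (List.foldl (fun w k => if (A.getD i []).getD k 0 * (B.getD k []).getD j 0 = 1 then (k : Int) + 1 else w)
                  (pvCell W i j) (List.range A.length)))
            W (List.range A.length))
        (List.replicate A.length (List.replicate A.length 0)) (List.range A.length)).getD i [] :=
      (pv_getD_of_lt _ i h1).symm
    apply List.ext_getElem
    · rw [hrowD, pv_colFold_rowlen (fun i j v => (List.range A.length).foldl
          (fun w k => if (A.getD i []).getD k 0 * (B.getD k []).getD j 0 = 1 then (k : Int) + 1 else w) v)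
          (List.range A.length) (List.range A.length)
          (List.replicate A.length (List.replicate A.length (0 : Int))) i,
        pv_rowlen_W0 A.length i hn]
      simp
    · intro j hj1 hj2
      have hjn : j < A.length := by simpa using hj2
      rw [List.getElem_map, List.getElem_range]
      rw [pv_cell_getElem _ i j h1 hj1]
      rw [pv_colFold_cell (fun i j v => (List.range A.length).foldl
            (fun w k => if (A.getD i []).getD k 0 * (B.getD k []).getD j 0 = 1 then (k : Int) + 1 else w) v)
          (List.range A.length) List.nodup_range (List.range A.length) List.nodup_range
          (List.replicate A.length (List.replicate A.length (0 : Int)))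
          (fun a ha => by simp [List.mem_range.mp ha]) i j]
      rw [if_pos ⟨List.mem_range.mpr hn, List.mem_range.mpr hjn, by rw [pv_rowlen_W0 A.length i hn]; exact hjn⟩]
      rw [pv_cell_W0]
      exact pv_scalar A B i j A.length

-- ===== VERDICT (by name: the statement is the Claim_ definition above) =====
theorem compute_witness_trivial_spec : Claim_equal_compute_witness_trivial := by
  intro A B _ _
  unfold Spec_compute_witness_trivial
  exact pv_main A B
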